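-- pv_equiv track=rewrite | github.com/dic-case-studies/casa6 | casatasks/src/private/task_sdbaseline.py | has_duplicate_nonnull_element
-- ===== SOURCE A (Python) =====
-- from collections import Counter
--
-- def has_duplicate_nonnull_element(in_list):
--     # return True if in_list has duplicated elements other than ''
--     duplicates = [key for key, val in Counter(in_list).items() if val > 1]
--     len_duplicates = len(duplicates)
--
--     if (len_duplicates >= 2):
--         return True
--     elif (len_duplicates == 1):
--         return (duplicates[0] != '')
--     else:  # len_duplicates == 0
--         return False
-- ===== SOURCE B (Python) =====
-- def has_duplicate_nonnull_element(in_list):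
--     # return True if in_list has duplicated elements other than ''
--     seen = set()
--     for element in in_list:
--         if element in seen and element != '':
--             return True
--         seen.add(element)
--     return False
-- ===== Notes on version B (the rewrite author's own statement) =====
-- stated objective: faster
-- what changed: Replaces the Counter-then-filter-then-length-branch pipeline with a single early-exit pass that maintains a seen-set and returns True at the first repeated non-empty element.
import Mathlib
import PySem

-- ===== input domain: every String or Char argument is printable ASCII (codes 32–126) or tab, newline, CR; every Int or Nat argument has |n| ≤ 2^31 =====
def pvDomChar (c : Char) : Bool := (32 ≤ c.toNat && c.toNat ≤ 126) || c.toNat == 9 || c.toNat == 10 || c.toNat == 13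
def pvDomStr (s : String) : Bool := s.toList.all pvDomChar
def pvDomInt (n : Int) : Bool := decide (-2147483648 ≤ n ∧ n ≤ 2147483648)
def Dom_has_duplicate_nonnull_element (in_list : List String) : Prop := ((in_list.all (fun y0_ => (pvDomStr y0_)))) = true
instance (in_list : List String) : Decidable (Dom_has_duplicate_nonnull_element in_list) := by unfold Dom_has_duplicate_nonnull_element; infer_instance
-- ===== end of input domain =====

-- B replaces A's Counter/filter/length-branch pipeline by one early-exit pass over a growing seen-set.


-- ===== PORT A =====
-- duplicates[0] is ported as pyGetD … 0 "" ; it is only read in the branch where duplicates has exactly one element, so the default is never used.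
def has_duplicate_nonnull_element (in_list : List String) : Bool :=
  let duplicates :=
    ((PySem.Dict.counter in_list).items.filter (fun kv => decide (1 < kv.2))).map Prod.fst
  let len_duplicates := duplicates.length
  if 2 ≤ len_duplicates then true
  else if len_duplicates = 1 then decide (PySem.List.pyGetD duplicates 0 "" ≠ "")
  else false

-- ===== PORT B =====
def pvAltLoop (seen : PySem.Set String) : List String → Bool
  | [] => false
  | element :: rest =>
    if PySem.Set.contains seen element && decide (element ≠ "") then true
    else pvAltLoop (PySem.Set.add seen element) rest

def has_duplicate_nonnull_element_alt (in_list : List String) : Bool :=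
  pvAltLoop PySem.Set.empty in_list

-- ===== PRECONDITION & SPEC =====
def Spec_has_duplicate_nonnull_element (in_list : List String) (out : Bool) : Prop := out = has_duplicate_nonnull_element_alt in_list
instance (in_list : List String) (out : Bool) : Decidable (Spec_has_duplicate_nonnull_element in_list out) := by unfold Spec_has_duplicate_nonnull_element; infer_instance

-- ===== CLAIM (what is proved, stated in full; the proofs are below) =====
def Claim_equal_has_duplicate_nonnull_element : Prop := ∀ (in_list : List String), Dom_has_duplicate_nonnull_element in_list → Spec_has_duplicate_nonnull_element in_list (has_duplicate_nonnull_element in_list)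

-- ===== LEMMAS AND PROOFS =====

-- B's loop invariant: true iff some non-empty string is repeated, counting `seen` as earlier occurrences.
theorem pvAltLoop_iff (seen : PySem.Set String) (l : List String) :
    pvAltLoop seen l = true ↔
      ∃ y, y ≠ "" ∧ ((y ∈ seen ∧ y ∈ l) ∨ 2 ≤ l.count y) := by
  induction l generalizing seen with
  | nil => simp [pvAltLoop]
  | cons x rest ih =>
    by_cases h : PySem.Set.contains seen x = true ∧ x ≠ ""
    · have hx : x ∈ seen := (PySem.Set.contains_iff ..).mp h.1
      simp only [pvAltLoop, h.1, h.2, ne_eq, not_false_eq_true, decide_true, Bool.and_self,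
        if_true, true_iff]
      exact ⟨x, h.2, Or.inl ⟨hx, by simp⟩⟩
    · have hcond : (PySem.Set.contains seen x && decide (x ≠ "")) = false := by
        rcases not_and_or.mp h with h1 | h1
        · rw [Bool.eq_false_iff.mpr h1]; rfl
        · simp [not_not.mp h1]
        
      simp only [pvAltLoop, hcond, Bool.false_eq_true, if_false]
      rw [ih]
      constructor
      · rintro ⟨y, hy, hcase⟩
        refine ⟨y, hy, ?_⟩
        rcases hcase with ⟨hs, hr⟩ | hc
        · rcases (PySem.Set.mem_add ..).mp hs with hs | hs
          · exact Or.inl ⟨hs, List.mem_cons_of_mem _ hr⟩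
          · subst hs
            right
            have := List.count_pos_iff.mpr hr
            simp only [List.count_cons_self]; omega
        · right
          have : rest.count y ≤ (x :: rest).count y := by
            simp only [List.count_cons]; omega
          omega
      · rintro ⟨y, hy, hcase⟩
        refine ⟨y, hy, ?_⟩
        rcases hcase with ⟨hs, hr⟩ | hc
        · rcases List.mem_cons.mp hr with rfl | hr
          · exact absurd ⟨(PySem.Set.contains_iff ..).mpr hs, hy⟩ h
          · exact Or.inl ⟨(PySem.Set.mem_add ..).mpr (Or.inl hs), hr⟩
        · by_cases hxy : y = x
          · subst hxy
            have hr : y ∈ rest := by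
              rw [List.count_cons_self] at hc
              exact List.count_pos_iff.mp (by omega)
            exact Or.inl ⟨(PySem.Set.mem_add ..).mpr (Or.inr rfl), hr⟩
          · right
            simp only [List.count_cons, beq_iff_eq, if_neg (fun he : x = y => hxy he.symm)] at hc
            omega

theorem alt_iff (l : List String) :
    has_duplicate_nonnull_element_alt l = true ↔ ∃ y, y ≠ "" ∧ 2 ≤ l.count y := by
  rw [has_duplicate_nonnull_element_alt, pvAltLoop_iff]
  simp [PySem.Set.empty]

-- A's duplicates list is the dedup of l restricted to repeated elements.
theorem dups_eq (l : List String) :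
    ((PySem.Dict.counter l).items.filter (fun kv => decide (1 < kv.2))).map Prod.fst
      = (PySem.Set.ofList l).filter (fun k => decide (1 < (l.count k : Int))) := by
  rw [PySem.Dict.items_counter, List.filter_map, List.map_map]
  simp [Function.comp_def]

theorem mem_dups (l : List String) (y : String) :
    y ∈ (PySem.Set.ofList l).filter (fun k => decide (1 < (l.count k : Int))) ↔
      2 ≤ l.count y := by
  simp only [List.mem_filter, PySem.Set.mem_ofList, decide_eq_true_eq]
  constructor
  · rintro ⟨-, h⟩; omega
  · intro h; exact ⟨List.count_pos_iff.mp (by omega), by omega⟩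

-- A's final length-branch cascade on a duplicate list without repeats.
theorem branch_iff (dups : List String) (hnd : dups.Nodup) :
    (if 2 ≤ dups.length then true
     else if dups.length = 1 then decide (PySem.List.pyGetD dups 0 "" ≠ "")
     else false) = true ↔ ∃ y ∈ dups, y ≠ "" := by
  match dups with
  | [] => norm_num
  | [a] =>
    have h0 : PySem.List.pyGetD [a] 0 "" = a := rfl
    simp [h0]
  | a :: b :: rest =>
    have hab : a ≠ b := by
      rcases List.nodup_cons.mp hnd with ⟨h1, -⟩
      intro he; exact h1 (he ▸ List.mem_cons_self ..)
    simp only [List.length_cons, if_pos (by omega : 2 ≤ rest.length + 1 + 1), true_iff]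
    rcases eq_or_ne a "" with rfl | ha
    · exact ⟨b, by simp, Ne.symm hab⟩
    · exact ⟨a, by simp, ha⟩

theorem a_iff (l : List String) :
    has_duplicate_nonnull_element l = true ↔ ∃ y, y ≠ "" ∧ 2 ≤ l.count y := by
  rw [has_duplicate_nonnull_element]
  simp only [dups_eq]
  rw [branch_iff _ ((PySem.Set.nodup_ofList l).filter _)]
  constructor
  · rintro ⟨y, hm, hy⟩; exact ⟨y, hy, (mem_dups l y).mp hm⟩
  · rintro ⟨y, hy, hc⟩; exact ⟨y, (mem_dups l y).mpr hc, hy⟩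

-- ===== VERDICT (by name: the statement is the Claim_ definition above) =====
theorem has_duplicate_nonnull_element_spec : Claim_equal_has_duplicate_nonnull_element := by
  intro l _
  unfold Spec_has_duplicate_nonnull_element
  have := (a_iff l).trans (alt_iff l).symm
  cases ha : has_duplicate_nonnull_element l <;> cases hb : has_duplicate_nonnull_element_alt l <;>
    simp_all
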